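-- pv_equiv track=rewrite | github.com/cjuub/advent-of-code | 2021/23/aoc23.py | is_other_room
-- ===== SOURCE A (Python) =====
-- goals = {"A": [(3, 2), (3, 3), (3, 4), (3, 5)], "B": [(5, 2), (5, 3), (5, 4), (5, 5)], "C": [(7, 2), (7, 3), (7, 4), (7, 5)], "D": [(9, 2), (9, 3), (9, 4), (9, 5)]}
--
-- def is_other_room(amphi, position):
--     other_goal = False
--     for amphi_goal, goal_poses in goals.items():
--         if amphi_goal == amphi:
--             continue
--         if position in goal_poses:
--             other_goal = True
--             break
--     return other_goal
-- ===== SOURCE B (Python) =====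
-- def is_other_room(amphi, position):
--     x, y = position
--     if 2 <= y <= 5 and x in (3, 5, 7, 9):
--         return "ABCD"[(x - 3) // 2] != amphi
--     return False
-- ===== Notes on version B (the rewrite author's own statement) =====
-- stated objective: simpler
-- what changed: Replaces the scan over the goals dict (skipping the amphipod's own room and testing list membership) by a closed-form arithmetic test: a goal room has x in {3,5,7,9} and 2<=y<=5, and its owner letter is "ABCD"[(x-3)//2], compared against amphi.
import Mathlib
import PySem

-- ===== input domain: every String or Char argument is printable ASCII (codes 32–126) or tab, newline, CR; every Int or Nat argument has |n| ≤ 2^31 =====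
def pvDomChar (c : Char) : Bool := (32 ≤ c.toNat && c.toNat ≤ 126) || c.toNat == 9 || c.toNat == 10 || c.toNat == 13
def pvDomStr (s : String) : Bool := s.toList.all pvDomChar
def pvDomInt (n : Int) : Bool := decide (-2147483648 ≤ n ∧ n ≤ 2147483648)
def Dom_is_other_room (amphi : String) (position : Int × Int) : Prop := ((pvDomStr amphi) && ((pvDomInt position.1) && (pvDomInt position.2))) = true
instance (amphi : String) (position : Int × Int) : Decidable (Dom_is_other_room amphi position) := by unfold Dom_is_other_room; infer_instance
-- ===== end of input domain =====

-- B replaces A's scan over the goals dict by a closed-form arithmetic test on the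
-- coordinates, recovering the room's owner letter from its column (objective: simpler).

-- ===== PORT A =====
def goalsA : List (String × List (Int × Int)) :=
  [("A", [(3, 2), (3, 3), (3, 4), (3, 5)]),
   ("B", [(5, 2), (5, 3), (5, 4), (5, 5)]),
   ("C", [(7, 2), (7, 3), (7, 4), (7, 5)]),
   ("D", [(9, 2), (9, 3), (9, 4), (9, 5)])]

-- the for-loop with continue/break, as structural recursion over goals.items()
def loopA (amphi : String) (position : Int × Int) : List (String × List (Int × Int)) → Bool
  | [] => false
  | (amphi_goal, goal_poses) :: rest =>
    if amphi_goal == amphi then loopA amphi position rest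
    else if goal_poses.contains position then true
    else loopA amphi position rest

def is_other_room (amphi : String) (position : Int × Int) : Bool :=
  loopA amphi position goalsA

-- ===== PORT B =====
-- "ABCD"[(x-3)//2] under the guard always hits index 0..3; the none branch is unreachable.
def is_other_room_alt (amphi : String) (position : Int × Int) : Bool :=
  let x := position.1
  let y := position.2
  if (2 ≤ y && y ≤ 5) && (x == 3 || x == 5 || x == 7 || x == 9) then
    match PySem.Str.pyGet? "ABCD" (PySem.Int.floordiv (x - 3) 2) with
    | some c => String.ofList [c] != amphi
    | none => false
  else
    false

-- ===== PRECONDITION & SPEC =====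
def Spec_is_other_room (amphi : String) (position : Int × Int) (out : Bool) : Prop := out = is_other_room_alt amphi position
instance (amphi : String) (position : Int × Int) (out : Bool) : Decidable (Spec_is_other_room amphi position out) := by unfold Spec_is_other_room; infer_instance

-- ===== CLAIM (what is proved, stated in full; the proofs are below) =====
def Claim_equal_is_other_room : Prop := ∀ (amphi : String) (position : Int × Int), Dom_is_other_room amphi position → Spec_is_other_room amphi position (is_other_room amphi position)

-- ===== LEMMAS AND PROOFS =====

lemma main_eq (amphi : String) (x y : Int) :
    is_other_room amphi (x, y) = is_other_room_alt amphi (x, y) := by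
  by_cases hg : (2 ≤ y ∧ y ≤ 5) ∧ (x = 3 ∨ x = 5 ∨ x = 7 ∨ x = 9)
  · obtain ⟨⟨hy1, hy2⟩, hx⟩ := hg
    have hy : y = 2 ∨ y = 3 ∨ y = 4 ∨ y = 5 := by omega
    rcases hx with rfl | rfl | rfl | rfl <;> rcases hy with rfl | rfl | rfl | rfl <;>
      simp [is_other_room, is_other_room_alt, loopA, goalsA, bne, beq_eq_decide]
  · have hne : ∀ a b : Int, ((2 ≤ b ∧ b ≤ 5) ∧ (a = 3 ∨ a = 5 ∨ a = 7 ∨ a = 9)) →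
        ¬ ((x, y) = (a, b)) := by
      rintro a b hab h
      obtain ⟨rfl, rfl⟩ := Prod.mk.injEq .. ▸ (Prod.ext_iff.mp h)
      exact hg ⟨⟨hab.1.1, hab.1.2⟩, hab.2⟩
    have hB : is_other_room_alt amphi (x, y) = false := by
      simp only [is_other_room_alt]
      rw [if_neg]
      simp only [Bool.and_eq_true, Bool.or_eq_true, decide_eq_true_eq, beq_iff_eq]
      tauto
    rw [hB]
    have h1 := hne 3 2 (by omega); have h2 := hne 3 3 (by omega)
    have h3 := hne 3 4 (by omega); have h4 := hne 3 5 (by omega)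
    have h5 := hne 5 2 (by omega); have h6 := hne 5 3 (by omega)
    have h7 := hne 5 4 (by omega); have h8 := hne 5 5 (by omega)
    have h9 := hne 7 2 (by omega); have h10 := hne 7 3 (by omega)
    have h11 := hne 7 4 (by omega); have h12 := hne 7 5 (by omega)
    have h13 := hne 9 2 (by omega); have h14 := hne 9 3 (by omega)
    have h15 := hne 9 4 (by omega); have h16 := hne 9 5 (by omega)
    simp [is_other_room, loopA, goalsA, h1, h2, h3, h4, h5, h6, h7, h8,
      h9, h10, h11, h12, h13, h14, h15, h16]

-- ===== VERDICT (by name: the statement is the Claim_ definition above) =====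
theorem is_other_room_spec : Claim_equal_is_other_room := by
  intro amphi position _
  unfold Spec_is_other_room
  obtain ⟨x, y⟩ := position
  exact main_eq amphi x y
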